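-- pv_equiv track=rewrite | github.com/rlee32/daily-coding-solutions | 464-medium/solve.py | extract_set
-- ===== SOURCE A (Python) =====
-- def match(i, j):
--     return max(i, j) % min(i, j) == 0
--
-- def match_set(number_set, candidate):
--     for i in number_set:
--         if not match(candidate, i):
--             return False
--     return True
--
-- def extract_set(numbers):
--     new_set = set([numbers.pop()])
--     for i in numbers:
--         if match_set(new_set, i):
--             new_set.add(i)
--     for i in new_set:
--         if i in numbers:
--             numbers.remove(i)
--     return new_set
-- ===== SOURCE B (Python) =====
-- from bisect import bisect_left
--
-- def extract_set(numbers):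
--     # Same return value and same mutation of `numbers` as the original:
--     # seeds from numbers.pop(), greedily keeps candidates mutually divisible
--     # with everything kept so far, then removes the kept values from numbers.
--     seed = numbers.pop()
--     members = {seed}
--     chain = [seed]  # members kept sorted; a mutually-divisible set is a divisibility chain
--     for c in numbers:
--         if c in members:
--             continue
--         i = bisect_left(chain, c)
--         # c is compatible with the whole chain iff it is compatible with its
--         # two sorted neighbours (divisibility is transitive along the chain)
--         if (i == 0 or c % chain[i - 1] == 0) and (i == len(chain) or chain[i] % c == 0):
--             chain.insert(i, c)
--             members.add(c)
--     for v in chain: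
--         if v in numbers:
--             numbers.remove(v)
--     return members
-- ===== Notes on version B (the rewrite author's own statement) =====
-- stated objective: faster
-- what changed: B keeps the accepted elements as a sorted divisibility chain and tests a candidate only against its two bisected neighbours (predecessor divides c, c divides successor), instead of A's rescan of the whole set per candidate; a membership set short-circuits duplicates.
-- outside the precondition, e.g. on extract_set([0, -2]): A returns {0, -2}, B returns {0, -2}
import Mathlib
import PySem

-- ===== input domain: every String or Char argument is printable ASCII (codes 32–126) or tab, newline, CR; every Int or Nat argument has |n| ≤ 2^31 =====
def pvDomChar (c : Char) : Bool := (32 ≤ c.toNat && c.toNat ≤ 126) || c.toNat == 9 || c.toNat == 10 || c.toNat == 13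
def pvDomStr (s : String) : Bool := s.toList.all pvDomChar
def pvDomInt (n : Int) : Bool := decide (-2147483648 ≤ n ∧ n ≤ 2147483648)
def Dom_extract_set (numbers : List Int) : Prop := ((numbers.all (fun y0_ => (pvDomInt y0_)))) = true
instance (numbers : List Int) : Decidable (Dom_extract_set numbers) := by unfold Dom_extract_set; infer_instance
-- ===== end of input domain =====

-- B replaces A's per-candidate rescan of the whole kept set by a sorted divisibility
-- chain with a two-neighbour bisect test (objective: faster).  Both Pythons mutate
-- `numbers` identically (pop + removals); the equivalence proved here is about the
-- RETURN value (a set, represented as its insertion-order distinct list).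

-- ===== PORT A =====
-- `match(i, j)` : max(i,j) % min(i,j) == 0  (Python % is PySem.Int.mod; min = 0 is
-- ZeroDivisionError in Python, excluded by Pre_)
def pyMatch (i j : Int) : Bool := PySem.Int.mod (max i j) (min i j) == 0

-- `match_set` : for-loop with early return False = List.all
def match_set (number_set : List Int) (candidate : Int) : Bool :=
  number_set.all (fun i => pyMatch candidate i)

def extract_set (numbers : List Int) : List Int :=
  match numbers.getLast? with
  | none => []  -- Python: numbers.pop() raises IndexError; excluded by Pre_
  | some seed =>
    -- after the pop, the loop runs over the remaining prefix
    (numbers.dropLast).foldl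
      (fun new_set i => if match_set new_set i then PySem.Set.add new_set i else new_set)
      (PySem.Set.ofList [seed])
    -- the final Python loop only mutates the argument; the returned value is new_set

-- ===== PORT B =====
def altStep (p : List Int × List Int) (c : Int) : List Int × List Int :=
  if PySem.Set.contains p.2 c then p
  else
    let chain := p.1
    let i := PySem.List.bisectLeft chain c
    -- getD's default is never used: the short-circuit guards keep the index in range
    if ((i == 0) || (PySem.Int.mod c (chain.getD (i - 1) 0) == 0)) &&
       ((i == chain.length) || (PySem.Int.mod (chain.getD i 0) c == 0)) then
      (chain.insertIdx i c, PySem.Set.add p.2 c)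
    else p

def extract_set_alt (numbers : List Int) : List Int :=
  match numbers.getLast? with
  | none => []  -- Python: numbers.pop() raises IndexError; excluded by Pre_
  | some seed =>
    ((numbers.dropLast).foldl altStep ([seed], PySem.Set.ofList [seed])).2

-- ===== PRECONDITION & SPEC =====
-- Pre_ excludes the empty list (numbers.pop() raises IndexError) and lists containing 0:
-- on those, whichever comparisons the run happens to make against a nonnegative element
-- raise ZeroDivisionError, and whether that happens is not a closed-form shape of the
-- input, so all lists containing 0 are excluded (on a few of them A still returns, see cites).
def Pre_extract_set (numbers : List Int) : Prop := numbers ≠ [] ∧ ¬ (0 ∈ numbers)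
instance (numbers : List Int) : Decidable (Pre_extract_set numbers) := by unfold Pre_extract_set; infer_instance
def pvWitness_extract_set : List Int := [4, 6, 2, 8]

def Spec_extract_set (numbers : List Int) (out : List Int) : Prop := out = extract_set_alt numbers
instance (numbers : List Int) (out : List Int) : Decidable (Spec_extract_set numbers out) := by unfold Spec_extract_set; infer_instance

-- ===== CLAIM (what is proved, stated in full; the proofs are below) =====
def Claim_equal_extract_set : Prop := ∀ (numbers : List Int), Dom_extract_set numbers → Pre_extract_set numbers → Spec_extract_set numbers (extract_set numbers)

-- ===== LEMMAS AND PROOFS =====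

-- Invariant tying B's sorted chain to A's insertion-order set s:
-- same elements, chain strictly sorted, and the kept elements are pairwise "compatible"
-- (the smaller divides the larger).
def ChainInv (chain s : List Int) : Prop :=
  chain.Perm s ∧ chain.Pairwise (· < ·) ∧ ∀ x ∈ s, ∀ y ∈ s, min x y ∣ max x y

theorem pair_dvd {chain s : List Int} (h : ChainInv chain s) {x y : Int}
    (hx : x ∈ s) (hy : y ∈ s) (hxy : x ≤ y) : x ∣ y := by
  have := h.2.2 x hx y hy
  rwa [min_eq_left hxy, max_eq_right hxy] at this

theorem match_set_iff (s : List Int) (c : Int) :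
    match_set s c = true ↔ ∀ x ∈ s, min x c ∣ max x c := by
  simp only [match_set, List.all_eq_true, pyMatch, beq_iff_eq,
    PySem.Int.mod_eq_zero_iff_dvd]
  constructor
  · intro h x hx; have := h x hx; rwa [min_comm, max_comm]
  · intro h x hx; have := h x hx; rwa [min_comm, max_comm]

-- strict sortedness of the chain gives ≤ sortedness (what bisectLeft_spec wants)
theorem chain_le_sorted {chain : List Int} (h : chain.Pairwise (· < ·)) :
    chain.Pairwise (· ≤ ·) := h.imp (fun hab => le_of_lt hab)

-- The crux: for a NEW candidate, A's full-set test equals B's two-neighbour test.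
theorem test_eq {chain s : List Int} (h : ChainInv chain s) {c : Int} (hc : c ∉ s) :
    match_set s c =
      (((PySem.List.bisectLeft chain c == 0) ||
        (PySem.Int.mod c (chain.getD (PySem.List.bisectLeft chain c - 1) 0) == 0)) &&
       ((PySem.List.bisectLeft chain c == chain.length) ||
        (PySem.Int.mod (chain.getD (PySem.List.bisectLeft chain c) 0) c == 0))) := by
  obtain ⟨hperm, hsort, _hM⟩ := h
  obtain ⟨hile, hlt, hge⟩ := PySem.List.bisectLeft_spec chain c (chain_le_sorted hsort)
  set i := PySem.List.bisectLeft chain c with hi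
  have hmemc : c ∉ chain := fun hx => hc (hperm.mem_iff.mp hx)
  have hmem : ∀ x, x ∈ chain ↔ x ∈ s := fun x => hperm.mem_iff
  rw [Bool.eq_iff_iff, match_set_iff]
  simp only [Bool.and_eq_true, Bool.or_eq_true, beq_iff_eq,
    PySem.Int.mod_eq_zero_iff_dvd]
  constructor
  · intro hall
    constructor
    · by_cases h0 : i = 0
      · exact Or.inl h0
      · refine Or.inr ?_
        have hlt1 : i - 1 < chain.length := by omega
        have hpred : chain[i-1] ∈ s := (hmem _).mp (List.getElem_mem hlt1)
        have hplt : chain[i-1] < c := hlt (i-1) hlt1 (by omega)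
        have := hall _ hpred
        rw [min_eq_left (le_of_lt hplt), max_eq_right (le_of_lt hplt)] at this
        rwa [List.getD_eq_getElem _ _ hlt1]
    · by_cases hL : i = chain.length
      · exact Or.inl hL
      · refine Or.inr ?_
        have hiL : i < chain.length := by omega
        have hsucc : chain[i] ∈ s := (hmem _).mp (List.getElem_mem hiL)
        have hcle : c ≤ chain[i] := hge i hiL (le_refl i)
        have := hall _ hsucc
        rw [min_eq_right hcle, max_eq_left hcle] at this
        rwa [List.getD_eq_getElem _ _ hiL]
  · rintro ⟨h1, h2⟩ x hxs
    obtain ⟨j, hj, rfl⟩ := List.getElem_of_mem ((hmem x).mpr hxs)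
    by_cases hji : j < i
    · -- x is strictly below c: pred | c and x | pred
      have hxlt : chain[j] < c := hlt j hj hji
      have h0 : i ≠ 0 := by omega
      have hpd : chain.getD (i-1) 0 ∣ c := h1.resolve_left h0
      have hlt1 : i - 1 < chain.length := by omega
      rw [List.getD_eq_getElem _ _ hlt1] at hpd
      have hxp : chain[j] ∣ chain[i-1] := by
        rcases Nat.lt_or_ge j (i-1) with hlt2 | hge2
        · exact pair_dvd ⟨hperm, hsort, _hM⟩
            ((hmem _).mp (List.getElem_mem hj)) ((hmem _).mp (List.getElem_mem hlt1))
            (le_of_lt (List.pairwise_iff_getElem.mp hsort j (i-1) hj hlt1 hlt2))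
        · have : j = i - 1 := by omega
          subst this; exact dvd_refl _
      rw [min_eq_left (le_of_lt hxlt), max_eq_right (le_of_lt hxlt)]
      exact dvd_trans hxp hpd
    · -- x is strictly above c: c | succ and succ | x
      have hij : i ≤ j := by omega
      have hcle : c ≤ chain[j] := hge j hj hij
      have hclt : c < chain[j] := lt_of_le_of_ne hcle
        (fun he => hmemc (he ▸ List.getElem_mem hj))
      have hL : i ≠ chain.length := by omega
      have hiL : i < chain.length := by omega
      have hcs : c ∣ chain.getD i 0 := h2.resolve_left hL
      rw [List.getD_eq_getElem _ _ hiL] at hcs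
      have hsx : chain[i] ∣ chain[j] := by
        rcases Nat.lt_or_ge i j with hlt2 | hge2
        · exact pair_dvd ⟨hperm, hsort, _hM⟩
            ((hmem _).mp (List.getElem_mem hiL)) ((hmem _).mp (List.getElem_mem hj))
            (le_of_lt (List.pairwise_iff_getElem.mp hsort i j hiL hj hlt2))
        · have : i = j := by omega
          subst this; exact dvd_refl _
      rw [min_eq_right (le_of_lt hclt), max_eq_left (le_of_lt hclt)]
      exact dvd_trans hcs hsx

-- l.insertIdx n a as take/cons/drop (no such Mathlib lemma by this statement)
theorem insertIdx_take_cons_drop (l : List Int) (n : Nat) (a : Int) (h : n ≤ l.length) :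
    l.insertIdx n a = l.take n ++ a :: l.drop n := by
  induction l generalizing n with
  | nil =>
    have : n = 0 := by simpa using h
    subst this; rfl
  | cons x xs ih =>
    cases n with
    | zero => rfl
    | succ m =>
      simp only [List.insertIdx_succ_cons, List.take_succ_cons, List.drop_succ_cons,
        List.cons_append, List.cons.injEq, true_and]
      exact ih m (by simpa using h)

-- Accepting a new compatible candidate preserves the invariant.
theorem inv_step {chain s : List Int} (h : ChainInv chain s) {c : Int} (hc : c ∉ s)
    (hok : match_set s c = true) :
    ChainInv (chain.insertIdx (PySem.List.bisectLeft chain c) c) (s ++ [c]) := by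
  obtain ⟨hperm, hsort, hM⟩ := h
  obtain ⟨hile, hlt, hge⟩ := PySem.List.bisectLeft_spec chain c (chain_le_sorted hsort)
  set i := PySem.List.bisectLeft chain c with hi
  have hmemc : c ∉ chain := fun hx => hc (hperm.mem_iff.mp hx)
  have hall := (match_set_iff s c).mp hok
  have hdropLt : ∀ b ∈ chain.drop i, c < b := by
    intro b hb
    obtain ⟨k, hk, rfl⟩ := List.getElem_of_mem hb
    have hkL : i + k < chain.length := by rw [List.length_drop] at hk; omega
    rw [List.getElem_drop]
    exact lt_of_le_of_ne (hge (i+k) hkL (by omega))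
      (fun he => hmemc (he ▸ List.getElem_mem hkL))
  refine ⟨?_, ?_, ?_⟩
  · exact ((List.perm_insertIdx c chain hile).trans
      ((hperm.cons c).trans (List.perm_append_singleton c s).symm))
  · rw [insertIdx_take_cons_drop chain i c hile, List.pairwise_append]
    refine ⟨hsort.sublist (List.take_sublist ..), ?_, ?_⟩
    · exact List.pairwise_cons.mpr ⟨hdropLt, hsort.sublist (List.drop_sublist ..)⟩
    · intro a ha b hb
      obtain ⟨j, hjlt, rfl⟩ := List.getElem_of_mem ha
      have hjlt' := hjlt
      rw [List.length_take] at hjlt'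
      have hjL : j < chain.length := by omega
      have hji : j < i := by omega
      rw [List.getElem_take]
      have halt : chain[j] < c := hlt j hjL hji
      rcases List.mem_cons.mp hb with rfl | hb'
      · exact halt
      · exact lt_trans halt (hdropLt _ hb')
  · intro x hx y hy
    rcases List.mem_append.mp hx with hx' | hx' <;>
      rcases List.mem_append.mp hy with hy' | hy'
    · exact hM x hx' y hy'
    · rw [List.mem_singleton] at hy'; subst hy'; exact hall x hx'
    · rw [List.mem_singleton] at hx'; subst hx'
      have := hall y hy'; rwa [min_comm, max_comm]
    · rw [List.mem_singleton] at hx' hy'; subst hx'; subst hy'; simp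

-- When the candidate is already kept, A's test passes (the set is pairwise compatible).
theorem match_set_of_mem {chain s : List Int} (h : ChainInv chain s) {c : Int}
    (hc : c ∈ s) : match_set s c = true :=
  (match_set_iff s c).mpr (fun x hx => h.2.2 x hx c hc)

-- Main loop agreement: under the invariant, A's fold over the set equals the second
-- component of B's fold over (chain, members).
theorem fold_eq (rest : List Int) : ∀ (chain s : List Int), ChainInv chain s →
    rest.foldl (fun new_set i => if match_set new_set i then PySem.Set.add new_set i
      else new_set) s
    = (rest.foldl altStep (chain, s)).2 := by
  induction rest with
  | nil => intro chain s _; rfl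
  | cons c rest ih =>
    intro chain s h
    simp only [List.foldl_cons]
    by_cases hc : c ∈ s
    · have hms : match_set s c = true := match_set_of_mem h hc
      have hadd : PySem.Set.add s c = s := by simp [PySem.Set.add, hc]
      have hB : altStep (chain, s) c = (chain, s) := by simp [altStep, hc]
      rw [hms, if_pos rfl, hadd, hB]
      exact ih chain s h
    · have hct : PySem.Set.contains s c = false := by simp [PySem.Set.contains, hc]
      have htest := test_eq h hc
      by_cases hok : match_set s c = true
      · have hadd : PySem.Set.add s c = s ++ [c] := by simp [PySem.Set.add, hc]
        have hB : altStep (chain, s) c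
            = (chain.insertIdx (PySem.List.bisectLeft chain c) c, s ++ [c]) := by
          simp only [altStep, hct, Bool.false_eq_true, if_false]
          rw [← htest, hok, if_pos rfl, hadd]
        rw [hok, if_pos rfl, hadd, hB]
        exact ih _ _ (by simpa [hadd] using inv_step h hc hok)
      · have hB : altStep (chain, s) c = (chain, s) := by
          simp only [altStep, hct, Bool.false_eq_true, if_false]
          rw [← htest, if_neg hok]
        rw [if_neg hok, hB]
        exact ih chain s h

-- ===== VERDICT (by name: the statement is the Claim_ definition above) =====
theorem extract_set_spec : Claim_equal_extract_set := by
  intro numbers _hdom _hpre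
  cases h : numbers.getLast? with
  | none => simp only [Spec_extract_set, extract_set, extract_set_alt, h]
  | some seed =>
    simp only [Spec_extract_set, extract_set, extract_set_alt, h]
    have hof : PySem.Set.ofList [seed] = [seed] := rfl
    rw [hof]
    exact fold_eq (numbers.dropLast) [seed] [seed]
      ⟨List.Perm.refl _, by simp, by intro x hx y hy; simp_all⟩
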